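-- pv_equiv track=rewrite | github.com/TOMATOsJr/Text2Table | rebel_pipeline/pre-processing-finetune/tsv_to_rebel_preprocess.py | count_leading_pipes
-- ===== SOURCE A (Python) =====
-- def count_leading_pipes(text: str) -> int:
--     count = 0
--     for ch in text:
--         if ch == "|":
--             count += 1
--         else:
--             break
--     return count
-- ===== SOURCE B (Python) =====
-- def count_leading_pipes(text: str) -> int:
--     stripped = text.lstrip("|")
--     return len(text) - len(stripped)
-- ===== Notes on version B (the rewrite author's own statement) =====
-- stated objective: simpler
-- what changed: Replaces the explicit scan-and-count loop with a left-strip of leading pipes and a length difference, so no counter or break logic is maintained.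
import Mathlib
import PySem

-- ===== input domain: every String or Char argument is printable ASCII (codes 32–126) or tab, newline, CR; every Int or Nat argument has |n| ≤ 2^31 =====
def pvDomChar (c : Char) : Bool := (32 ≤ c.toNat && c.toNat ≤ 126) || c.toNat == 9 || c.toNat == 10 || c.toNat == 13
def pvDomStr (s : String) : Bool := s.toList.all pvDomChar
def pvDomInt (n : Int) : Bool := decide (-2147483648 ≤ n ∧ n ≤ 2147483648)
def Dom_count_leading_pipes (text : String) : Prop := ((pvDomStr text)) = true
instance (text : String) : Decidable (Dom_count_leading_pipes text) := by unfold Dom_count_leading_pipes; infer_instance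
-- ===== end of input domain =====

-- B replaces A's explicit scan-and-count loop by lstrip('|') plus a length difference (objective: simpler).

-- ===== PORT A =====
-- for ch in text: if ch == '|': count += 1 else: break
def countLoopA : List Char → Int → Int
  | [], count => count
  | ch :: rest, count => if ch == '|' then countLoopA rest (count + 1) else count

def count_leading_pipes (text : String) : Int := countLoopA text.toList 0

-- ===== PORT B =====
-- text.lstrip('|') ported by hand as dropWhile (· == '|'): exact, since Python's
-- lstrip('|') removes exactly the leading run of '|' characters.
def count_leading_pipes_alt (text : String) : Int :=
  let stripped := text.toList.dropWhile (· == '|')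
  (text.toList.length : Int) - stripped.length

-- ===== PRECONDITION & SPEC =====
def Spec_count_leading_pipes (text : String) (out : Int) : Prop := out = count_leading_pipes_alt text
instance (text : String) (out : Int) : Decidable (Spec_count_leading_pipes text out) := by unfold Spec_count_leading_pipes; infer_instance

-- ===== CLAIM (what is proved, stated in full; the proofs are below) =====
def Claim_equal_count_leading_pipes : Prop := ∀ (text : String), Dom_count_leading_pipes text → Spec_count_leading_pipes text (count_leading_pipes text)

-- ===== LEMMAS AND PROOFS =====
theorem countLoopA_eq (l : List Char) : ∀ (c : Int),
    countLoopA l c = c + ((l.length : Int) - (l.dropWhile (· == '|')).length) := by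
  induction l with
  | nil => intro c; simp [countLoopA]
  | cons ch rest ih =>
    intro c
    by_cases h : ch = '|'
    · have hlen : (rest.dropWhile (· == '|')).length ≤ rest.length :=
        List.length_dropWhile_le _ _
      simp [countLoopA, h, ih, List.dropWhile]
      omega
    · simp [countLoopA, h]

-- ===== VERDICT (by name: the statement is the Claim_ definition above) =====
theorem count_leading_pipes_spec : Claim_equal_count_leading_pipes := by
  intro text _
  unfold Spec_count_leading_pipes count_leading_pipes count_leading_pipes_alt
  simp [countLoopA_eq]
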